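-- pv_equiv track=rewrite | github.com/dokan722/LeetCode | Python/Problems/Problems/problem2616.py | countDiffs
-- ===== SOURCE A (Python) =====
-- def countDiffs(nums, maxDiff):
--     count = 0
--     i = 0
--     while i < len(nums) - 1:
--         if abs(nums[i] - nums[i + 1]) <= maxDiff:
--             i += 1
--             count += 1
--         i += 1
--     return count
-- ===== SOURCE B (Python) =====
-- def countDiffs(nums, maxDiff):
--     # Run-length accumulation: each maximal streak of `run` consecutive
--     # matching adjacent pairs contributes ceil(run/2) = (run+1)//2.
--     count = 0
--     run = 0
--     for a, b in zip(nums, nums[1:]):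
--         if abs(a - b) <= maxDiff:
--             run += 1
--         else:
--             count += (run + 1) // 2
--             run = 0
--     return count + (run + 1) // 2
-- ===== Notes on version B (the rewrite author's own statement) =====
-- stated objective: alternative
-- what changed: Replaces A's greedy index-jumping while-loop (advance 2 on a match, 1 otherwise) with a single pass over adjacent pairs that accumulates the length of each run of matching gaps and adds the closed form (run+1)//2 per run.
import Mathlib
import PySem

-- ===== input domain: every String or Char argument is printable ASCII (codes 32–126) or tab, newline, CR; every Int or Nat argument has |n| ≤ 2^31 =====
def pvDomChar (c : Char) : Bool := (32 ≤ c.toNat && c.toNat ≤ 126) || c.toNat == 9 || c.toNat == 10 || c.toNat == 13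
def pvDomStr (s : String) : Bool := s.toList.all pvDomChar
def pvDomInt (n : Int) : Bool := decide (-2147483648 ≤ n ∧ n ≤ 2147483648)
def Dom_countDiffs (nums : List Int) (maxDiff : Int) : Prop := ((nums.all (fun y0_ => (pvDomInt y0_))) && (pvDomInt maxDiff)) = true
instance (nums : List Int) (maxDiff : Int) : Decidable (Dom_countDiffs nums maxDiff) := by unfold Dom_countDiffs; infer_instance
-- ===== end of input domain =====

-- B replaces A's greedy index-jumping scan by a single pass over adjacent pairs with
-- run-length accumulation, adding the closed form (run+1)//2 per maximal run (objective: simpler).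


-- ===== PORT A =====
-- while-loop of A: i advances by 2 on a matching pair, by 1 otherwise.
-- nums[i] / nums[i+1] via PySem.List.pyGet?; inside the loop both indices are in range,
-- so the .getD 0 default never fires.
def countDiffsLoop (nums : List Int) (maxDiff : Int) (i : Nat) (count : Int) : Int :=
  if h : i < nums.length - 1 then
    if |(PySem.List.pyGet? nums (i : Int)).getD 0 -
        (PySem.List.pyGet? nums ((i : Int) + 1)).getD 0| ≤ maxDiff then
      countDiffsLoop nums maxDiff (i + 2) (count + 1)
    else
      countDiffsLoop nums maxDiff (i + 1) count
  else
    count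
termination_by nums.length - 1 - i
decreasing_by all_goals omega

def countDiffs (nums : List Int) (maxDiff : Int) : Int :=
  countDiffsLoop nums maxDiff 0 0

-- ===== PORT B =====
-- B's for-loop over zip(nums, nums[1:]) (nums[1:] = tail), carrying (count, run);
-- (run+1)//2 is Nat division (run is a nonnegative counter).
def countDiffsAltLoop (maxDiff : Int) : List (Int × Int) → Int → Nat → Int
  | [], count, run => count + ((run + 1) / 2 : Nat)
  | (a, b) :: t, count, run =>
      if |a - b| ≤ maxDiff then countDiffsAltLoop maxDiff t count (run + 1)
      else countDiffsAltLoop maxDiff t (count + ((run + 1) / 2 : Nat)) 0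

def countDiffs_alt (nums : List Int) (maxDiff : Int) : Int :=
  countDiffsAltLoop maxDiff (nums.zip nums.tail) 0 0

-- ===== PRECONDITION & SPEC =====
def Spec_countDiffs (nums : List Int) (maxDiff : Int) (out : Int) : Prop := out = countDiffs_alt nums maxDiff
instance (nums : List Int) (maxDiff : Int) (out : Int) : Decidable (Spec_countDiffs nums maxDiff out) := by unfold Spec_countDiffs; infer_instance

-- ===== CLAIM (what is proved, stated in full; the proofs are below) =====
def Claim_equal_countDiffs : Prop := ∀ (nums : List Int) (maxDiff : Int), Dom_countDiffs nums maxDiff → Spec_countDiffs nums maxDiff (countDiffs nums maxDiff)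

-- ===== LEMMAS AND PROOFS =====

-- the list of per-gap match flags
def pvFlags (nums : List Int) (maxDiff : Int) : List Bool :=
  (nums.zip nums.tail).map (fun x => decide (|x.1 - x.2| ≤ maxDiff))

-- A's greedy count, abstracted to the flag list
def pvG : List Bool → Int
  | [] => 0
  | b :: t => if b then 1 + pvG (t.drop 1) else pvG t
termination_by l => l.length
decreasing_by all_goals (simp; try omega)

-- B's run accumulator, abstracted to the flag list
def pvH : List Bool → Nat → Int
  | [], run => ((run + 1) / 2 : Nat)
  | b :: t, run => if b then pvH t (run + 1) else ((run + 1) / 2 : Nat) + pvH t 0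

theorem pvG_replicate (r : Nat) : pvG (List.replicate r true) = ((r + 1) / 2 : Nat) := by
  induction r using Nat.strong_induction_on with
  | _ r ih =>
    match r with
    | 0 => simp [pvG]
    | 1 => simp [pvG]
    | (r + 2) =>
      have h := ih r (by omega)
      rw [List.replicate_succ, List.replicate_succ]
      simp only [pvG, if_true, List.drop_succ_cons, List.drop_zero]
      rw [h]
      have h2 : (r + 2 + 1) / 2 = 1 + (r + 1) / 2 := by omega
      rw [h2]; push_cast; ring

theorem pvG_replicate_false (r : Nat) (t : List Bool) :
    pvG (List.replicate r true ++ false :: t) = ((r + 1) / 2 : Nat) + pvG t := by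
  induction r using Nat.strong_induction_on with
  | _ r ih =>
    match r with
    | 0 => simp [pvG]
    | 1 => simp [pvG]
    | (r + 2) =>
      have h := ih r (by omega)
      rw [List.replicate_succ, List.replicate_succ, List.cons_append, List.cons_append]
      simp only [pvG, if_true, List.drop_succ_cons, List.drop_zero]
      rw [h]
      have h2 : (r + 2 + 1) / 2 = 1 + (r + 1) / 2 := by omega
      rw [h2]; push_cast; ring

theorem pvH_eq_pvG (bs : List Bool) : ∀ run : Nat,
    pvH bs run = pvG (List.replicate run true ++ bs) := by
  induction bs with
  | nil => intro run; simp [pvH, pvG_replicate]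
  | cons b t ih =>
    intro run
    cases b with
    | true =>
      rw [pvH, if_pos rfl, ih (run + 1), List.replicate_succ']
      simp [List.append_assoc]
    | false =>
      rw [pvH, if_neg (by simp), ih 0, pvG_replicate_false]
      simp

theorem pvAltLoop_eq (maxDiff : Int) (ps : List (Int × Int)) : ∀ (count : Int) (run : Nat),
    countDiffsAltLoop maxDiff ps count run =
      count + pvH (ps.map (fun x => decide (|x.1 - x.2| ≤ maxDiff))) run := by
  induction ps with
  | nil => intro count run; simp [countDiffsAltLoop, pvH]
  | cons p t ih =>
    intro count run
    obtain ⟨a, b⟩ := p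
    by_cases hp : |a - b| ≤ maxDiff
    · simp [countDiffsAltLoop, hp, pvH, ih]
    · simp [countDiffsAltLoop, hp, pvH, ih, add_assoc]

theorem pvFlags_length (nums : List Int) (maxDiff : Int) :
    (pvFlags nums maxDiff).length = nums.length - 1 := by
  simp [pvFlags, List.length_zip]
  try omega

theorem pvFlags_getElem (nums : List Int) (maxDiff : Int) (i : Nat)
    (h : i < (pvFlags nums maxDiff).length) :
    (pvFlags nums maxDiff)[i] =
      decide (|nums[i]'(by simp [pvFlags_length] at h; omega) -
               nums[i+1]'(by simp [pvFlags_length] at h; omega)| ≤ maxDiff) := by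
  simp [pvFlags, List.getElem_zip, List.getElem_tail]

theorem pvLoopA_eq (nums : List Int) (maxDiff : Int) : ∀ (i : Nat) (count : Int),
    countDiffsLoop nums maxDiff i count = count + pvG ((pvFlags nums maxDiff).drop i) := by
  intro i count
  induction i, count using countDiffsLoop.induct nums maxDiff with
  | case1 i count h hab ih =>
    have hi : i < (pvFlags nums maxDiff).length := by rw [pvFlags_length]; omega
    have hi1 : i < nums.length := by omega
    have hi2 : i + 1 < nums.length := by omega
    have ha : (PySem.List.pyGet? nums (i : Int)).getD 0 = nums[i] := by
      simp only [PySem.List.pyGet?_natCast, List.getElem?_eq_getElem hi1, Option.getD_some]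
    have hb : (PySem.List.pyGet? nums ((i : Int) + 1)).getD 0 = nums[i+1] := by
      have hc : ((i : Int) + 1) = ((i + 1 : Nat) : Int) := by push_cast; ring
      simp only [hc, PySem.List.pyGet?_natCast, List.getElem?_eq_getElem hi2, Option.getD_some]
    have hflag : (pvFlags nums maxDiff)[i] = true := by
      rw [pvFlags_getElem]
      rw [ha, hb] at hab; simpa using hab
    rw [countDiffsLoop]
    rw [dif_pos h, if_pos hab, ih]
    rw [List.drop_eq_getElem_cons hi, hflag]
    simp only [pvG, if_true]
    rw [List.drop_drop]
    ring
  | case2 i count h hab ih =>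
    have hi : i < (pvFlags nums maxDiff).length := by rw [pvFlags_length]; omega
    have hi1 : i < nums.length := by omega
    have hi2 : i + 1 < nums.length := by omega
    have ha : (PySem.List.pyGet? nums (i : Int)).getD 0 = nums[i] := by
      simp only [PySem.List.pyGet?_natCast, List.getElem?_eq_getElem hi1, Option.getD_some]
    have hb : (PySem.List.pyGet? nums ((i : Int) + 1)).getD 0 = nums[i+1] := by
      have hc : ((i : Int) + 1) = ((i + 1 : Nat) : Int) := by push_cast; ring
      simp only [hc, PySem.List.pyGet?_natCast, List.getElem?_eq_getElem hi2, Option.getD_some]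
    have hflag : (pvFlags nums maxDiff)[i] = false := by
      rw [pvFlags_getElem]
      rw [ha, hb] at hab; simpa using hab
    rw [countDiffsLoop]
    rw [dif_pos h, if_neg hab, ih]
    rw [List.drop_eq_getElem_cons hi, hflag]
    simp only [pvG, Bool.false_eq_true, if_false]
  | case3 i count h =>
    have hd : (pvFlags nums maxDiff).drop i = [] := by
      apply List.drop_eq_nil_of_le
      rw [pvFlags_length]; omega
    rw [countDiffsLoop]
    simp [h, hd, pvG]

-- ===== VERDICT (by name: the statement is the Claim_ definition above) =====
theorem countDiffs_spec : Claim_equal_countDiffs := by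
  intro nums maxDiff _
  unfold Spec_countDiffs countDiffs countDiffs_alt
  rw [pvLoopA_eq, pvAltLoop_eq]
  simp only [List.drop_zero, zero_add]
  rw [pvH_eq_pvG]
  simp [pvFlags]
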